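-- pv_equiv track=rewrite | github.com/sciados/campaign-backend | src/content/services/sales_focused_content_service.py | _identify_conversion_points
-- ===== SOURCE A (Python) =====
-- from typing import List, Optional, Dict, Any, Union
--
-- def _identify_conversion_points(email_framework: List[Dict[str, Any]]) -> List[str]:
--     """Identify key conversion points in the email sequence"""
--
--     conversion_points = []
--
--     for i, email in enumerate(email_framework):
--         email_type = email["type"]
--
--         if email_type == "solution_introduction":
--             conversion_points.append(f"Email {i+1}: Initial interest capture")
--         elif email_type == "social_proof_explosion":
--             conversion_points.append(f"Email {i+1}: Trust building and validation")
--         elif email_type in ["urgency_scarcity", "objection_crusher", "final_call"]: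
--             conversion_points.append(f"Email {i+1}: Direct conversion attempt")
--
--     return conversion_points
-- ===== SOURCE B (Python) =====
-- _CATEGORIES = [
--     ("Initial interest capture", ("solution_introduction",)),
--     ("Trust building and validation", ("social_proof_explosion",)),
--     ("Direct conversion attempt",
--      ("urgency_scarcity", "objection_crusher", "final_call")),
-- ]
--
-- def _identify_conversion_points(email_framework):
--     """Staged: one scan per conversion category collecting (index, desc) hits,
--     then merge the per-category hit lists back into email order by sorting on
--     the index (indices are unique, so the order is exactly email order)."""
--     hits = []
--     for desc, types in _CATEGORIES:
--         for i, email in enumerate(email_framework):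
--             if email["type"] in types:
--                 hits.append((i, desc))
--     hits.sort(key=lambda h: h[0])
--     return [f"Email {i + 1}: {desc}" for i, desc in hits]
-- ===== Notes on version B (the rewrite author's own statement) =====
-- stated objective: alternative
-- what changed: Instead of a single pass with an if/elif dispatch per email, B makes one scan per conversion category collecting (index, description) hits and then merges the per-category hit lists back into email order by sorting on the unique index.
import Mathlib
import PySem

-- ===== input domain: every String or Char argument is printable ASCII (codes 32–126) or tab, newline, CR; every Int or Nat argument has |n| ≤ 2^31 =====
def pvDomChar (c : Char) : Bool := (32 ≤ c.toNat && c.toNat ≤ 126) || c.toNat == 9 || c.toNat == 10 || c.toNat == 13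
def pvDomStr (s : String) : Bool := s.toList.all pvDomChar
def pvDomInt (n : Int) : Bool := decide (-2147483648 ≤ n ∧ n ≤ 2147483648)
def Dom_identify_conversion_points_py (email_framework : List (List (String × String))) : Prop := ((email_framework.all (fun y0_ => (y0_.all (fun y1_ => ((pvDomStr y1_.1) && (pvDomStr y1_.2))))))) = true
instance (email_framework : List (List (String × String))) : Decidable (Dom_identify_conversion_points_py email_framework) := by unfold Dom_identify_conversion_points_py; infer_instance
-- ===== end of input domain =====

-- B scans once per conversion category and merges the hits by sorting on the unique index;
-- equivalence of the RETURN value is claimed on inputs where every email carries a "type" key.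

-- email["type"]: first-match lookup in the association list (KeyError = none, excluded by Pre_)
def pyGetType (email : List (String × String)) : Option String :=
  (email.find? (fun kv => kv.1 == "type")).map (·.2)

-- ===== PORT A =====
-- literal transliteration of A: enumerate + if/elif chain appending to an accumulator
def identify_conversion_points_py (email_framework : List (List (String × String))) : List String :=
  (PySem.List.enumerate email_framework 0).foldl
    (fun conversion_points ie =>
      match pyGetType ie.2 with
      | none => conversion_points      -- Python raises KeyError here; outside Pre_
      | some email_type =>
        if email_type = "solution_introduction" then
          conversion_points ++ ["Email " ++ PySem.Int.toStr (ie.1 + 1) ++ ": Initial interest capture"]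
        else if email_type = "social_proof_explosion" then
          conversion_points ++ ["Email " ++ PySem.Int.toStr (ie.1 + 1) ++ ": Trust building and validation"]
        else if email_type ∈ ["urgency_scarcity", "objection_crusher", "final_call"] then
          conversion_points ++ ["Email " ++ PySem.Int.toStr (ie.1 + 1) ++ ": Direct conversion attempt"]
        else conversion_points) []

-- ===== PORT B =====
def pvCategories : List (String × List String) :=
  [("Initial interest capture", ["solution_introduction"]),
   ("Trust building and validation", ["social_proof_explosion"]),
   ("Direct conversion attempt", ["urgency_scarcity", "objection_crusher", "final_call"])]

-- literal transliteration of B: per-category scans collecting (index, desc) hits,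
-- then a stable sort on the index, then formatting
def identify_conversion_points_py_alt (email_framework : List (List (String × String))) : List String :=
  let hits : List (Int × String) :=
    pvCategories.foldl
      (fun hits cat =>
        (PySem.List.enumerate email_framework 0).foldl
          (fun hits ie =>
            match pyGetType ie.2 with
            | none => hits             -- Python raises KeyError here; outside Pre_
            | some t => if t ∈ cat.2 then hits ++ [(ie.1, cat.1)] else hits) hits) []
  let sortedHits := PySem.List.sorted hits (fun h => h.1) false
  sortedHits.map (fun h => "Email " ++ PySem.Int.toStr (h.1 + 1) ++ ": " ++ h.2)

-- ===== PRECONDITION & SPEC =====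
-- Pre_ excludes exactly the inputs where the Python A raises KeyError: an email without the key "type".
def Pre_identify_conversion_points_py (email_framework : List (List (String × String))) : Prop :=
  (email_framework.all (fun email => email.any (fun kv => kv.1 == "type"))) = true
instance (email_framework : List (List (String × String))) : Decidable (Pre_identify_conversion_points_py email_framework) := by unfold Pre_identify_conversion_points_py; infer_instance
def pvWitness_identify_conversion_points_py : (List (List (String × String))) :=
  [[("type", "solution_introduction")], [("type", "final_call"), ("subject", "Last chance")]]

def Spec_identify_conversion_points_py (email_framework : List (List (String × String))) (out : List String) : Prop := out = identify_conversion_points_py_alt email_framework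
instance (email_framework : List (List (String × String))) (out : List String) : Decidable (Spec_identify_conversion_points_py email_framework out) := by unfold Spec_identify_conversion_points_py; infer_instance

-- ===== CLAIM (what is proved, stated in full; the proofs are below) =====
def Claim_equal_identify_conversion_points_py : Prop := ∀ (email_framework : List (List (String × String))), Dom_identify_conversion_points_py email_framework → Pre_identify_conversion_points_py email_framework → Spec_identify_conversion_points_py email_framework (identify_conversion_points_py email_framework)

-- ===== LEMMAS AND PROOFS =====

-- the description A's if/elif chain assigns to a type (none = no conversion point)
def chainDesc (t : String) : Option String :=
  if t = "solution_introduction" then some "Initial interest capture"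
  else if t = "social_proof_explosion" then some "Trust building and validation"
  else if t ∈ ["urgency_scarcity", "objection_crusher", "final_call"] then some "Direct conversion attempt"
  else none

-- the merged hit an email contributes
def gHit (ie : Int × List (String × String)) : Option (Int × String) :=
  match pyGetType ie.2 with
  | none => none
  | some t => (chainDesc t).map (fun d => (ie.1, d))

-- A's loop body as an optional appended string
def fA (ie : Int × List (String × String)) : Option String :=
  (gHit ie).map (fun h => "Email " ++ PySem.Int.toStr (h.1 + 1) ++ ": " ++ h.2)

-- the hit one category's scan contributes
def cHit (cat : String × List String) (ie : Int × List (String × String)) : Option (Int × String) :=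
  match pyGetType ie.2 with
  | none => none
  | some t => if t ∈ cat.2 then some (ie.1, cat.1) else none

lemma foldl_append_opt {α β : Type} (F : α → Option β) (l : List α) (acc : List β) :
    l.foldl (fun a x => a ++ (F x).toList) acc = acc ++ l.filterMap F := by
  induction l generalizing acc with
  | nil => simp
  | cons x xs ih =>
    simp only [List.foldl_cons, List.filterMap_cons]
    cases h : F x <;> simp [ih]

lemma A_eq (fw : List (List (String × String))) :
    identify_conversion_points_py fw
      = ((PySem.List.enumerate fw 0).filterMap gHit).map
          (fun h => "Email " ++ PySem.Int.toStr (h.1 + 1) ++ ": " ++ h.2) := by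
  unfold identify_conversion_points_py
  have hbody : (fun (conversion_points : List String) (ie : Int × List (String × String)) =>
      match pyGetType ie.2 with
      | none => conversion_points
      | some email_type =>
        if email_type = "solution_introduction" then
          conversion_points ++ ["Email " ++ PySem.Int.toStr (ie.1 + 1) ++ ": Initial interest capture"]
        else if email_type = "social_proof_explosion" then
          conversion_points ++ ["Email " ++ PySem.Int.toStr (ie.1 + 1) ++ ": Trust building and validation"]
        else if email_type ∈ ["urgency_scarcity", "objection_crusher", "final_call"] then
          conversion_points ++ ["Email " ++ PySem.Int.toStr (ie.1 + 1) ++ ": Direct conversion attempt"]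
        else conversion_points)
      = (fun a ie => a ++ (fA ie).toList) := by
    funext a ie
    simp only [fA, gHit, chainDesc]
    cases h : pyGetType ie.2 with
    | none => simp
    | some t =>
      dsimp only
      split_ifs <;> simp [String.append_assoc]
  rw [hbody, foldl_append_opt fA]
  simp only [fA, List.nil_append]
  rw [← List.map_filterMap]

lemma B_hits (fw : List (List (String × String))) :
    pvCategories.foldl
      (fun hits cat =>
        (PySem.List.enumerate fw 0).foldl
          (fun hits ie =>
            match pyGetType ie.2 with
            | none => hits
            | some t => if t ∈ cat.2 then hits ++ [(ie.1, cat.1)] else hits) hits) []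
      = (PySem.List.enumerate fw 0).filterMap (cHit ("Initial interest capture", ["solution_introduction"]))
        ++ (PySem.List.enumerate fw 0).filterMap (cHit ("Trust building and validation", ["social_proof_explosion"]))
        ++ (PySem.List.enumerate fw 0).filterMap (cHit ("Direct conversion attempt", ["urgency_scarcity", "objection_crusher", "final_call"])) := by
  have inner : ∀ (cat : String × List String) (acc : List (Int × String)),
      (PySem.List.enumerate fw 0).foldl
        (fun hits ie =>
          match pyGetType ie.2 with
          | none => hits
          | some t => if t ∈ cat.2 then hits ++ [(ie.1, cat.1)] else hits) acc
        = acc ++ (PySem.List.enumerate fw 0).filterMap (cHit cat) := by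
    intro cat acc
    have hbody : (fun (hits : List (Int × String)) (ie : Int × List (String × String)) =>
        match pyGetType ie.2 with
        | none => hits
        | some t => if t ∈ cat.2 then hits ++ [(ie.1, cat.1)] else hits)
        = (fun a ie => a ++ (cHit cat ie).toList) := by
      funext a ie
      simp only [cHit]
      cases h : pyGetType ie.2 with
      | none => simp
      | some t =>
        dsimp only
        split_ifs <;> simp
    rw [hbody, foldl_append_opt (cHit cat)]
  simp only [pvCategories, List.foldl_cons, List.foldl_nil, inner]
  simp [List.append_assoc]

-- the three disjoint category scans together are a permutation of the merged scan
lemma perm3 (l : List (Int × List (String × String))) :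
    (l.filterMap gHit).Perm
      (l.filterMap (cHit ("Initial interest capture", ["solution_introduction"]))
       ++ l.filterMap (cHit ("Trust building and validation", ["social_proof_explosion"]))
       ++ l.filterMap (cHit ("Direct conversion attempt", ["urgency_scarcity", "objection_crusher", "final_call"]))) := by
  induction l with
  | nil => simp
  | cons x xs ih =>
    simp only [List.filterMap_cons]
    cases hg : pyGetType x.2 with
    | none => simpa [gHit, cHit, hg] using ih
    | some t =>
      by_cases h1 : t = "solution_introduction"
      · simpa [gHit, cHit, hg, h1, chainDesc] using
          List.Perm.cons (x.1, "Initial interest capture") ih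
      · by_cases h2 : t = "social_proof_explosion"
        · rw [List.append_assoc] at ih
          have step := (List.Perm.cons (x.1, "Trust building and validation") ih).trans
            (List.perm_middle (a := (x.1, "Trust building and validation"))).symm
          simpa [gHit, cHit, hg, h1, h2, chainDesc, List.append_assoc] using step
        · by_cases h3 : t ∈ ["urgency_scarcity", "objection_crusher", "final_call"]
          · have step := (List.Perm.cons (x.1, "Direct conversion attempt") ih).trans
              (List.perm_middle (a := (x.1, "Direct conversion attempt"))).symm
            have hne1 : t ∉ ["solution_introduction"] := by simp_all
            have hne2 : t ∉ ["social_proof_explosion"] := by simp_all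
            simpa [gHit, cHit, hg, chainDesc, h1, h2, h3, hne1, hne2, List.append_assoc] using step
          · have hne1 : t ∉ ["solution_introduction"] := by simp_all
            have hne2 : t ∉ ["social_proof_explosion"] := by simp_all
            simpa [gHit, cHit, hg, chainDesc, h1, h2, h3, hne1, hne2] using ih

-- the merged scan is strictly increasing in the index
lemma gHit_pairwise (fw : List (List (String × String))) :
    ((PySem.List.enumerate fw 0).filterMap gHit).Pairwise (fun a b => a.1 < b.1) := by
  refine List.pairwise_filterMap.2 ?_
  refine (PySem.List.pairwise_lt_enumerate fw 0).imp ?_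
  intro a b hab x hx y hy
  have hx1 : x.1 = a.1 := by
    simp only [gHit] at hx
    cases h : pyGetType a.2 <;> simp [h] at hx
    rcases hx with ⟨d, _, rfl⟩; rfl
  have hy1 : y.1 = b.1 := by
    simp only [gHit] at hy
    cases h : pyGetType b.2 <;> simp [h] at hy
    rcases hy with ⟨d, _, rfl⟩; rfl
  omega

-- ===== VERDICT (by name: the statement is the Claim_ definition above) =====
theorem identify_conversion_points_py_spec : Claim_equal_identify_conversion_points_py := by
  intro fw _ _
  show identify_conversion_points_py fw = identify_conversion_points_py_alt fw
  rw [A_eq]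
  unfold identify_conversion_points_py_alt
  have hsorted : PySem.List.sorted
      (pvCategories.foldl
        (fun hits cat =>
          (PySem.List.enumerate fw 0).foldl
            (fun hits ie =>
              match pyGetType ie.2 with
              | none => hits
              | some t => if t ∈ cat.2 then hits ++ [(ie.1, cat.1)] else hits) hits) [])
      (fun h => h.1) false
      = (PySem.List.enumerate fw 0).filterMap gHit := by
    rw [B_hits]
    exact PySem.List.sorted_eq_of_perm_of_pairwise_lt _ _ _ (perm3 _) (gHit_pairwise fw)
  simp only [hsorted]
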